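-- pv_equiv track=rewrite | github.com/Zoom-Developer/PROD-2025-Individual | backend/src/core/utils/stat_merger.py | merge_stat_res
-- ===== SOURCE A (Python) =====
-- def merge_stat_res(
--         view: list[tuple[int, int, int]],
--         click: list[tuple[int, int, int]]
-- ) -> list[tuple[int, int, int, int, int]]:
--     res = {}
--     for i in view:
--         res[i[2]] = [i[0], i[1], 0, 0, i[2]]
--     for i in click:
--         res.setdefault(i[2], [0, 0, 0, 0, i[2]])
--         res[i[2]][2] = i[0]
--         res[i[2]][3] = i[1]
--     return sorted(res.values(), key=lambda x: x[4])
-- ===== SOURCE B (Python) =====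
-- def _latest(xs):
--     # latest entry per key: reversed scan keeping first hit per key, then sort by key
--     seen = set()
--     out = []
--     for t in reversed(xs):
--         if t[2] not in seen:
--             seen.add(t[2])
--             out.append(t)
--     return sorted(out, key=lambda t: t[2])
--
--
-- def merge_stat_res(
--         view: list[tuple[int, int, int]],
--         click: list[tuple[int, int, int]]
-- ) -> list[tuple[int, int, int, int, int]]:
--     v = _latest(view)
--     c = _latest(click)
--     res = []
--     i = j = 0
--     while i < len(v) and j < len(c):
--         if v[i][2] < c[j][2]:
--             res.append([v[i][0], v[i][1], 0, 0, v[i][2]])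
--             i += 1
--         elif c[j][2] < v[i][2]:
--             res.append([0, 0, c[j][0], c[j][1], c[j][2]])
--             j += 1
--         else:
--             res.append([v[i][0], v[i][1], c[j][0], c[j][1], v[i][2]])
--             i += 1
--             j += 1
--     while i < len(v):
--         res.append([v[i][0], v[i][1], 0, 0, v[i][2]])
--         i += 1
--     while j < len(c):
--         res.append([0, 0, c[j][0], c[j][1], c[j][2]])
--         j += 1
--     return res
-- ===== Notes on version B (the rewrite author's own statement) =====
-- stated objective: alternative
-- what changed: B replaces A's hash aggregation (one dict mutated in place, values sorted at the end) by a sort-merge join: each input list is reduced to its latest entry per key by a reversed scan, each reduced list is sorted by key, and the two sorted streams are combined by a two-pointer merge that fills zeros for the missing side.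
import Mathlib
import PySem

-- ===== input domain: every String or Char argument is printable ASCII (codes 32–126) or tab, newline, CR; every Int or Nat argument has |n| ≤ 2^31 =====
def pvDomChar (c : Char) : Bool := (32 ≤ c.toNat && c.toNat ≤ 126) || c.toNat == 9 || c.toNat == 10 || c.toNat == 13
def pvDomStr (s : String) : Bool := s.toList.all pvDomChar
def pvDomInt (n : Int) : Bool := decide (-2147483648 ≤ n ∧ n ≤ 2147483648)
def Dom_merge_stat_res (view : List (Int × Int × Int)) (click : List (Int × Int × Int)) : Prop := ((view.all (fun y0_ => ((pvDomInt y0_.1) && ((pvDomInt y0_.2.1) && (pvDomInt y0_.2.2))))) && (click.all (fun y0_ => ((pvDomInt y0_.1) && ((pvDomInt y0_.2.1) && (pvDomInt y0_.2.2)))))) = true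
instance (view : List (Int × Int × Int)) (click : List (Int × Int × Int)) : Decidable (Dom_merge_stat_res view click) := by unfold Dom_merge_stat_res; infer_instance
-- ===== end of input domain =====

-- B replaces A's in-place dict aggregation + final sort by a sort-merge join
-- (latest entry per key via a reversed scan, sort each side, two-pointer merge); alternative decomposition, same cost.

-- ===== PORT A =====
-- loop body of A's 'for i in click': setdefault, then res[i[2]][2] = i[0], then res[i[2]][3] = i[1]
def pvAStep (d : PySem.Dict Int (Int × Int × Int × Int × Int)) (i : Int × Int × Int) :
    PySem.Dict Int (Int × Int × Int × Int × Int) :=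
  let d := d.setdefault i.2.2 (0, 0, 0, 0, i.2.2)
  let d := d.modify i.2.2 (0, 0, 0, 0, i.2.2) (fun v => (v.1, v.2.1, i.1, v.2.2.2.1, v.2.2.2.2))
  d.modify i.2.2 (0, 0, 0, 0, i.2.2) (fun v => (v.1, v.2.1, v.2.2.1, i.2.1, v.2.2.2.2))

def merge_stat_res (view : List (Int × Int × Int)) (click : List (Int × Int × Int)) : List (Int × Int × Int × Int × Int) :=
  let res : PySem.Dict Int (Int × Int × Int × Int × Int) :=
    view.foldl (fun d i => d.insert i.2.2 (i.1, i.2.1, 0, 0, i.2.2)) PySem.Dict.empty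
  let res := click.foldl pvAStep res
  PySem.List.sorted res.values (fun x => x.2.2.2.2) false

-- ===== PORT B =====
-- the 'for t in reversed(xs): if t[2] not in seen: seen.add(t[2]); out.append(t)' loop of _latest
def pvScan : List (Int × Int × Int) → PySem.Set Int → List (Int × Int × Int)
  | [], _ => []
  | t :: rest, seen =>
      if PySem.Set.contains seen t.2.2 then pvScan rest seen
      else t :: pvScan rest (PySem.Set.add seen t.2.2)

-- _latest: reversed scan keeping the first hit per key, then sorted by key
def pvLatest (xs : List (Int × Int × Int)) : List (Int × Int × Int) :=
  PySem.List.sorted (pvScan xs.reverse PySem.Set.empty) (fun t => t.2.2) false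

-- the two-pointer while loops (remaining slices v[i:], c[j:] as the recursion arguments)
def pvMerge : List (Int × Int × Int) → List (Int × Int × Int) → List (Int × Int × Int × Int × Int)
  | [], cs => cs.map (fun c => (0, 0, c.1, c.2.1, c.2.2))
  | v :: vs, [] => (v :: vs).map (fun w => (w.1, w.2.1, 0, 0, w.2.2))
  | v :: vs, c :: cs =>
      if v.2.2 < c.2.2 then (v.1, v.2.1, 0, 0, v.2.2) :: pvMerge vs (c :: cs)
      else if c.2.2 < v.2.2 then (0, 0, c.1, c.2.1, c.2.2) :: pvMerge (v :: vs) cs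
      else (v.1, v.2.1, c.1, c.2.1, v.2.2) :: pvMerge vs cs
  termination_by vs cs => vs.length + cs.length

def merge_stat_res_alt (view : List (Int × Int × Int)) (click : List (Int × Int × Int)) : List (Int × Int × Int × Int × Int) :=
  pvMerge (pvLatest view) (pvLatest click)

-- ===== PRECONDITION & SPEC =====
def Spec_merge_stat_res (view : List (Int × Int × Int)) (click : List (Int × Int × Int)) (out : List (Int × Int × Int × Int × Int)) : Prop := out = merge_stat_res_alt view click
instance (view : List (Int × Int × Int)) (click : List (Int × Int × Int)) (out : List (Int × Int × Int × Int × Int)) : Decidable (Spec_merge_stat_res view click out) := by unfold Spec_merge_stat_res; infer_instance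

-- ===== CLAIM (what is proved, stated in full; the proofs are below) =====
def Claim_equal_merge_stat_res : Prop := ∀ (view : List (Int × Int × Int)) (click : List (Int × Int × Int)), Dom_merge_stat_res view click → Spec_merge_stat_res view click (merge_stat_res view click)

-- ===== LEMMAS AND PROOFS =====

-- proof-side index of a list by key (the winning value per key, as A's view loop builds it)
def pvIdx (xs : List (Int × Int × Int)) : PySem.Dict Int (Int × Int) :=
  xs.foldl (fun d i => d.insert i.2.2 (i.1, i.2.1)) PySem.Dict.empty

-- the merged record both sides produce for a key k
def pvG (vm cm : PySem.Dict Int (Int × Int)) (k : Int) : Int × Int × Int × Int × Int :=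
  ((vm.getD k (0, 0)).1, (vm.getD k (0, 0)).2, (cm.getD k (0, 0)).1, (cm.getD k (0, 0)).2, k)

-- last element of xs with key k (= the dict-overwrite winner, = the reversed-scan first hit)
def pvLast (xs : List (Int × Int × Int)) (k : Int) : Option (Int × Int × Int) :=
  xs.reverse.find? (fun u => u.2.2 == k)

theorem pvIdx_get? (xs : List (Int × Int × Int)) (k : Int) :
    (pvIdx xs).get? k = (pvLast xs k).map (fun u => (u.1, u.2.1)) := by
  induction xs using List.reverseRecOn with
  | nil => simp [pvIdx, pvLast, PySem.Dict.get?_empty]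
  | append_singleton xs t ih =>
      simp only [pvIdx, List.foldl_append, List.foldl_cons, List.foldl_nil] at *
      simp only [pvLast, List.reverse_append, List.reverse_cons, List.reverse_nil,
        List.nil_append, List.singleton_append, List.find?_cons] at *
      by_cases hk : t.2.2 = k
      · simp [hk, PySem.Dict.get?_insert_self]
      · rw [PySem.Dict.get?_insert_of_ne _ _ (fun h => hk h.symm)]
        have : (t.2.2 == k) = false := by simpa using hk
        rw [this]
        exact ih

theorem pvScan_mem (l : List (Int × Int × Int)) (seen : PySem.Set Int) (t : Int × Int × Int) :
    t ∈ pvScan l seen ↔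
      PySem.Set.contains seen t.2.2 = false ∧ l.find? (fun u => u.2.2 == t.2.2) = some t := by
  induction l generalizing seen with
  | nil => simp [pvScan]
  | cons a rest ih =>
      simp only [pvScan]
      by_cases ha : PySem.Set.contains seen a.2.2 = true
      · rw [if_pos ha, ih, List.find?_cons]
        by_cases hk : a.2.2 = t.2.2
        · have : (a.2.2 == t.2.2) = true := by simpa using hk
          rw [this]
          constructor
          · rintro ⟨h1, _⟩; rw [← hk] at h1; rw [ha] at h1; exact absurd h1 (by simp)
          · rintro ⟨h1, h2⟩
            cases h2
            rw [hk] at ha; rw [ha] at h1; exact absurd h1 (by simp)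
        · have : (a.2.2 == t.2.2) = false := by simpa using hk
          rw [this]
      · rw [if_neg ha, List.mem_cons, ih, List.find?_cons]
        have ha' : PySem.Set.contains seen a.2.2 = false := by
          cases h : PySem.Set.contains seen a.2.2 <;> simp_all
        by_cases hk : a.2.2 = t.2.2
        · have hbe : (a.2.2 == t.2.2) = true := by simpa using hk
          rw [hbe]
          constructor
          · rintro (rfl | h)
            · exact ⟨by rw [← hk]; exact ha', rfl⟩
            · exfalso
              have := h.1
              have hmem : t.2.2 ∈ PySem.Set.add seen a.2.2 := by
                rw [← hk]; exact (PySem.Set.mem_add _ _ _).2 (Or.inr rfl)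
              rw [← PySem.Set.contains_iff] at hmem
              rw [this] at hmem; exact absurd hmem (by simp)
          · rintro ⟨h1, h2⟩; cases h2; exact Or.inl rfl
        · have hbe : (a.2.2 == t.2.2) = false := by simpa using hk
          rw [hbe]
          constructor
          · rintro (rfl | h)
            · exact absurd rfl hk
            · refine ⟨?_, h.2⟩
              have := h.1
              cases hc : PySem.Set.contains seen t.2.2
              · rfl
              · exfalso
                rw [PySem.Set.contains_iff] at hc
                have : t.2.2 ∈ PySem.Set.add seen a.2.2 := (PySem.Set.mem_add _ _ _).2 (Or.inl hc)
                rw [← PySem.Set.contains_iff] at this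
                rw [h.1] at this; exact absurd this (by simp)
          · rintro ⟨h1, h2⟩
            refine Or.inr ⟨?_, h2⟩
            cases hc : PySem.Set.contains (PySem.Set.add seen a.2.2) t.2.2
            · rfl
            · exfalso
              rw [PySem.Set.contains_iff, PySem.Set.mem_add _ _ _] at hc
              rcases hc with h | h
              · rw [← PySem.Set.contains_iff] at h; rw [h1] at h; exact absurd h (by simp)
              · exact hk h.symm

theorem pvScan_key_fresh (l : List (Int × Int × Int)) (seen : PySem.Set Int) (k : Int)
    (h : k ∈ (pvScan l seen).map (fun t => t.2.2)) : PySem.Set.contains seen k = false := by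
  rcases List.mem_map.1 h with ⟨t, ht, rfl⟩
  exact ((pvScan_mem l seen t).1 ht).1

theorem pvScan_keys_nodup (l : List (Int × Int × Int)) (seen : PySem.Set Int) :
    ((pvScan l seen).map (fun t => t.2.2)).Nodup := by
  induction l generalizing seen with
  | nil => simp [pvScan]
  | cons a rest ih =>
      simp only [pvScan]
      by_cases ha : PySem.Set.contains seen a.2.2 = true
      · rw [if_pos ha]; exact ih seen
      · rw [if_neg ha, List.map_cons, List.nodup_cons]
        refine ⟨?_, ih _⟩
        intro hmem
        have := pvScan_key_fresh _ _ _ hmem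
        have hin : a.2.2 ∈ PySem.Set.add seen a.2.2 := (PySem.Set.mem_add _ _ _).2 (Or.inr rfl)
        rw [← PySem.Set.contains_iff] at hin
        rw [this] at hin; exact absurd hin (by simp)

theorem pvLatest_mem (xs : List (Int × Int × Int)) (t : Int × Int × Int) :
    t ∈ pvLatest xs ↔ pvLast xs t.2.2 = some t := by
  rw [pvLatest, PySem.List.mem_sorted, pvScan_mem, pvLast]
  have he : PySem.Set.contains PySem.Set.empty t.2.2 = false := rfl
  rw [he]
  simp

theorem pvLatest_keys_nodup (xs : List (Int × Int × Int)) :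
    ((pvLatest xs).map (fun t => t.2.2)).Nodup := by
  have hperm := (PySem.List.sorted_perm (pvScan xs.reverse PySem.Set.empty) (fun t => t.2.2) false).map (fun t => t.2.2)
  exact hperm.nodup_iff.2 (pvScan_keys_nodup _ _)

theorem pvLatest_pairwise (xs : List (Int × Int × Int)) :
    (pvLatest xs).Pairwise (fun a b => a.2.2 < b.2.2) := by
  have hle := PySem.List.sorted_pairwise (pvScan xs.reverse PySem.Set.empty) (fun t => t.2.2)
  have hnd := pvLatest_keys_nodup xs
  rw [List.nodup_iff_pairwise_ne, List.pairwise_map] at hnd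
  exact (hle.and hnd).imp (fun h => lt_of_le_of_ne h.1 h.2)

theorem pvLatest_getD (xs : List (Int × Int × Int)) (t : Int × Int × Int) (h : t ∈ pvLatest xs) :
    (pvIdx xs).getD t.2.2 (0, 0) = (t.1, t.2.1) := by
  rw [pvLatest_mem] at h
  have hg : (pvIdx xs).get? t.2.2 = some (t.1, t.2.1) := by
    rw [pvIdx_get?, h]; rfl
  exact PySem.Dict.getD_of_get?_eq_some _ _ hg

theorem pvIdx_contains_iff (xs : List (Int × Int × Int)) (k : Int) :
    (pvIdx xs).contains k = true ↔ k ∈ (pvLatest xs).map (fun t => t.2.2) := by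
  rw [PySem.Dict.contains_eq_isSome_get?, pvIdx_get?]
  constructor
  · intro h
    rcases Option.isSome_iff_exists.1 h with ⟨v, hv⟩
    rcases Option.map_eq_some_iff.1 hv with ⟨u, hu, _⟩
    have hk : u.2.2 = k := by simpa using List.find?_some hu
    refine List.mem_map.2 ⟨u, ?_, hk⟩
    rw [pvLatest_mem, pvLast, hk]
    rw [pvLast] at hu
    exact hu
  · intro h
    rcases List.mem_map.1 h with ⟨u, hu, rfl⟩
    rw [pvLatest_mem] at hu
    rw [pvLast] at hu ⊢
    rw [hu]
    rfl

-- merge of the two sorted key streams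
def pvKMerge : List Int → List Int → List Int
  | [], b => b
  | a :: as', [] => a :: as'
  | a :: as', b :: bs =>
      if a < b then a :: pvKMerge as' (b :: bs)
      else if b < a then b :: pvKMerge (a :: as') bs
      else a :: pvKMerge as' bs
  termination_by a b => a.length + b.length

theorem pvKMerge_mem (a b : List Int) (x : Int) : x ∈ pvKMerge a b ↔ x ∈ a ∨ x ∈ b := by
  induction a, b using pvKMerge.induct with
  | case1 b => simp [pvKMerge]
  | case2 a as' => simp [pvKMerge]
  | case3 a as' b bs h ih =>
      rw [pvKMerge, if_pos h]
      simp only [List.mem_cons, ih]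
      tauto
  | case4 a as' b bs h1 h2 ih =>
      rw [pvKMerge, if_neg h1, if_pos h2]
      simp only [List.mem_cons, ih]
      tauto
  | case5 a as' b bs h1 h2 ih =>
      rw [pvKMerge, if_neg h1, if_neg h2]
      have hab : a = b := le_antisymm (not_lt.1 h2) (not_lt.1 h1)
      simp only [List.mem_cons, ih, hab]
      tauto

theorem pvKMerge_pairwise (a b : List Int) (ha : a.Pairwise (· < ·)) (hb : b.Pairwise (· < ·)) :
    (pvKMerge a b).Pairwise (· < ·) := by
  induction a, b using pvKMerge.induct with
  | case1 b => simpa [pvKMerge] using hb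
  | case2 a as' => simpa [pvKMerge] using ha
  | case3 a as' b bs h ih =>
      rw [pvKMerge, if_pos h]
      rw [List.pairwise_cons] at ha hb ⊢
      refine ⟨?_, ih ha.2 (List.pairwise_cons.2 hb)⟩
      intro z hz
      rcases (pvKMerge_mem _ _ _).1 hz with hz | hz
      · exact ha.1 z hz
      · rcases List.mem_cons.1 hz with rfl | hz
        · exact h
        · exact h.trans (hb.1 z hz)
  | case4 a as' b bs h1 h2 ih =>
      rw [pvKMerge, if_neg h1, if_pos h2]
      rw [List.pairwise_cons] at ha hb ⊢
      refine ⟨?_, ih (List.pairwise_cons.2 ha) hb.2⟩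
      intro z hz
      rcases (pvKMerge_mem _ _ _).1 hz with hz | hz
      · rcases List.mem_cons.1 hz with rfl | hz
        · exact h2
        · exact h2.trans (ha.1 z hz)
      · exact hb.1 z hz
  | case5 a as' b bs h1 h2 ih =>
      rw [pvKMerge, if_neg h1, if_neg h2]
      have hab : a = b := le_antisymm (not_lt.1 h2) (not_lt.1 h1)
      rw [List.pairwise_cons] at ha hb ⊢
      refine ⟨?_, ih ha.2 hb.2⟩
      intro z hz
      rcases (pvKMerge_mem _ _ _).1 hz with hz | hz
      · exact ha.1 z hz
      · rw [hab]; exact hb.1 z hz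

theorem pvMerge_eq (vm cm : PySem.Dict Int (Int × Int)) : ∀ (vs cs : List (Int × Int × Int)),
    vs.Pairwise (fun a b => a.2.2 < b.2.2) → cs.Pairwise (fun a b => a.2.2 < b.2.2) →
    (∀ t ∈ vs, vm.getD t.2.2 (0, 0) = (t.1, t.2.1)) →
    (∀ t ∈ cs, cm.getD t.2.2 (0, 0) = (t.1, t.2.1)) →
    (∀ t ∈ vs, cm.contains t.2.2 = true → t.2.2 ∈ cs.map (fun u => u.2.2)) →
    (∀ t ∈ cs, vm.contains t.2.2 = true → t.2.2 ∈ vs.map (fun u => u.2.2)) →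
    pvMerge vs cs
      = (pvKMerge (vs.map (fun u => u.2.2)) (cs.map (fun u => u.2.2))).map (pvG vm cm) := by
  intro vs cs
  induction vs, cs using pvMerge.induct with
  | case1 cs =>
      intro _ _ _ hc _ hcv
      rw [pvMerge, List.map_nil, pvKMerge, List.map_map]
      apply List.map_congr_left
      intro c hcmem
      have h1 : cm.getD c.2.2 (0, 0) = (c.1, c.2.1) := hc c hcmem
      have h2 : vm.getD c.2.2 (0, 0) = (0, 0) := by
        apply PySem.Dict.getD_of_not_contains
        cases hco : vm.contains c.2.2
        · rfl
        · exact absurd (hcv c hcmem hco) (by simp)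
      simp [pvG, Function.comp, h1, h2]
  | case2 v vs' =>
      intro _ _ hv _ hvc _
      have hval : ∀ w ∈ v :: vs', (w.1, w.2.1, 0, 0, w.2.2) = pvG vm cm w.2.2 := by
        intro w hwmem
        have h1 : vm.getD w.2.2 (0, 0) = (w.1, w.2.1) := hv w hwmem
        have h2 : cm.getD w.2.2 (0, 0) = (0, 0) := by
          apply PySem.Dict.getD_of_not_contains
          cases hco : cm.contains w.2.2
          · rfl
          · exact absurd (hvc w hwmem hco) (by simp)
        simp [pvG, h1, h2]
      simp only [pvMerge, List.map_nil, List.map_cons, pvKMerge, List.map_map]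
      refine congrArg₂ _ (hval v List.mem_cons_self) ?_
      apply List.map_congr_left
      intro w hw
      simpa using hval w (List.mem_cons_of_mem _ hw)
  | case3 v vs' c cs' h ih =>
      intro hvs hcs hv hc hvc hcv
      rw [List.pairwise_cons] at hvs hcs
      rw [pvMerge, if_pos h]
      have hk : pvKMerge ((v :: vs').map (fun u => u.2.2)) ((c :: cs').map (fun u => u.2.2))
          = v.2.2 :: pvKMerge (vs'.map (fun u => u.2.2)) ((c :: cs').map (fun u => u.2.2)) := by
        rw [List.map_cons, List.map_cons, pvKMerge, if_pos h]
      rw [hk, List.map_cons]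
      have hvd : vm.getD v.2.2 (0, 0) = (v.1, v.2.1) := hv v List.mem_cons_self
      have hcd : cm.getD v.2.2 (0, 0) = (0, 0) := by
        apply PySem.Dict.getD_of_not_contains
        cases hco : cm.contains v.2.2
        · rfl
        · exfalso
          rcases List.mem_map.1 (hvc v List.mem_cons_self hco) with ⟨u, hu, hku⟩
          rcases List.mem_cons.1 hu with rfl | hu
          · exact absurd hku.symm (ne_of_lt h)
          · exact absurd hku.symm (ne_of_lt (h.trans (hcs.1 u hu)))
      refine congrArg₂ _ (by simp [pvG, hvd, hcd]) ?_
      apply ih hvs.2 (List.pairwise_cons.2 hcs)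
      · exact fun t ht => hv t (List.mem_cons_of_mem _ ht)
      · exact hc
      · exact fun t ht => hvc t (List.mem_cons_of_mem _ ht)
      · intro t ht hco
        rcases List.mem_map.1 (hcv t ht hco) with ⟨u, hu, hku⟩
        rcases List.mem_cons.1 hu with rfl | hu
        · exfalso
          rcases List.mem_cons.1 ht with rfl | ht
          · exact absurd hku (ne_of_lt h)
          · exact absurd hku (ne_of_lt (h.trans (hcs.1 t ht)))
        · exact List.mem_map.2 ⟨u, hu, hku⟩
  | case4 v vs' c cs' h1 h2 ih =>
      intro hvs hcs hv hc hvc hcv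
      rw [List.pairwise_cons] at hvs hcs
      rw [pvMerge, if_neg h1, if_pos h2]
      have hk : pvKMerge ((v :: vs').map (fun u => u.2.2)) ((c :: cs').map (fun u => u.2.2))
          = c.2.2 :: pvKMerge ((v :: vs').map (fun u => u.2.2)) (cs'.map (fun u => u.2.2)) := by
        rw [List.map_cons, List.map_cons, pvKMerge, if_neg h1, if_pos h2]
      rw [hk, List.map_cons]
      have hcd : cm.getD c.2.2 (0, 0) = (c.1, c.2.1) := hc c List.mem_cons_self
      have hvd : vm.getD c.2.2 (0, 0) = (0, 0) := by
        apply PySem.Dict.getD_of_not_contains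
        cases hco : vm.contains c.2.2
        · rfl
        · exfalso
          rcases List.mem_map.1 (hcv c List.mem_cons_self hco) with ⟨u, hu, hku⟩
          rcases List.mem_cons.1 hu with rfl | hu
          · exact absurd hku.symm (ne_of_lt h2)
          · exact absurd hku.symm (ne_of_lt (h2.trans (hvs.1 u hu)))
      refine congrArg₂ _ (by simp [pvG, hvd, hcd]) ?_
      apply ih (List.pairwise_cons.2 hvs) hcs.2
      · exact hv
      · exact fun t ht => hc t (List.mem_cons_of_mem _ ht)
      · intro t ht hco
        rcases List.mem_map.1 (hvc t ht hco) with ⟨u, hu, hku⟩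
        rcases List.mem_cons.1 hu with rfl | hu
        · exfalso
          rcases List.mem_cons.1 ht with rfl | ht
          · exact absurd hku (ne_of_lt h2)
          · exact absurd hku (ne_of_lt (h2.trans (hvs.1 t ht)))
        · exact List.mem_map.2 ⟨u, hu, hku⟩
      · exact fun t ht => hcv t (List.mem_cons_of_mem _ ht)
  | case5 v vs' c cs' h1 h2 ih =>
      intro hvs hcs hv hc hvc hcv
      rw [List.pairwise_cons] at hvs hcs
      have heq : v.2.2 = c.2.2 := le_antisymm (not_lt.1 h2) (not_lt.1 h1)
      rw [pvMerge, if_neg h1, if_neg h2]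
      have hk : pvKMerge ((v :: vs').map (fun u => u.2.2)) ((c :: cs').map (fun u => u.2.2))
          = v.2.2 :: pvKMerge (vs'.map (fun u => u.2.2)) (cs'.map (fun u => u.2.2)) := by
        rw [List.map_cons, List.map_cons, pvKMerge, if_neg h1, if_neg h2]
      rw [hk, List.map_cons]
      have hvd : vm.getD v.2.2 (0, 0) = (v.1, v.2.1) := hv v List.mem_cons_self
      have hcd : cm.getD v.2.2 (0, 0) = (c.1, c.2.1) := by
        rw [heq]; exact hc c List.mem_cons_self
      refine congrArg₂ _ (by simp [pvG, hvd, hcd]) ?_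
      apply ih hvs.2 hcs.2
      · exact fun t ht => hv t (List.mem_cons_of_mem _ ht)
      · exact fun t ht => hc t (List.mem_cons_of_mem _ ht)
      · intro t ht hco
        rcases List.mem_map.1 (hvc t (List.mem_cons_of_mem _ ht) hco) with ⟨u, hu, hku⟩
        rcases List.mem_cons.1 hu with rfl | hu
        · exfalso
          apply ne_of_lt (hvs.1 t ht)
          rw [heq]
          exact hku
        · exact List.mem_map.2 ⟨u, hu, hku⟩
      · intro t ht hco
        rcases List.mem_map.1 (hcv t (List.mem_cons_of_mem _ ht) hco) with ⟨u, hu, hku⟩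
        rcases List.mem_cons.1 hu with rfl | hu
        · exfalso
          apply ne_of_lt (hcs.1 t ht)
          rw [← heq]
          exact hku
        · exact List.mem_map.2 ⟨u, hu, hku⟩

-- ===== A-side: the dict loops, unchanged from the hash side =====
theorem view_fold_inv (view : List (Int × Int × Int))
    (d : PySem.Dict Int (Int × Int × Int × Int × Int)) (vm : PySem.Dict Int (Int × Int))
    (h : ∀ k, d.contains k = vm.contains k ∧
        d.getD k (0, 0, 0, 0, k) = ((vm.getD k (0, 0)).1, (vm.getD k (0, 0)).2, 0, 0, k)) :
    ∀ k, (view.foldl (fun d i => d.insert i.2.2 (i.1, i.2.1, 0, 0, i.2.2)) d).contains k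
          = (view.foldl (fun d i => d.insert i.2.2 (i.1, i.2.1)) vm).contains k ∧
        (view.foldl (fun d i => d.insert i.2.2 (i.1, i.2.1, 0, 0, i.2.2)) d).getD k (0, 0, 0, 0, k)
          = (((view.foldl (fun d i => d.insert i.2.2 (i.1, i.2.1)) vm).getD k (0, 0)).1,
             ((view.foldl (fun d i => d.insert i.2.2 (i.1, i.2.1)) vm).getD k (0, 0)).2, 0, 0, k) := by
  induction view generalizing d vm with
  | nil => exact h
  | cons i t ih =>
      simp only [List.foldl_cons]
      apply ih
      intro k
      by_cases hk : k = i.2.2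
      · subst hk
        simp [PySem.Dict.getD_insert_self]
      · refine ⟨?_, ?_⟩
        · simp [PySem.Dict.contains_insert, (h k).1]
        · rw [PySem.Dict.getD_insert_of_ne _ _ _ hk, PySem.Dict.getD_insert_of_ne _ _ _ hk]
          exact (h k).2

theorem click_fold_inv (click : List (Int × Int × Int)) (vm : PySem.Dict Int (Int × Int))
    (d : PySem.Dict Int (Int × Int × Int × Int × Int)) (cm : PySem.Dict Int (Int × Int))
    (h : ∀ k, d.contains k = (vm.contains k || cm.contains k) ∧
        d.getD k (0, 0, 0, 0, k) = pvG vm cm k) :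
    ∀ k, (click.foldl pvAStep d).contains k
          = (vm.contains k || (click.foldl (fun d i => d.insert i.2.2 (i.1, i.2.1)) cm).contains k) ∧
        (click.foldl pvAStep d).getD k (0, 0, 0, 0, k)
          = pvG vm (click.foldl (fun d i => d.insert i.2.2 (i.1, i.2.1)) cm) k := by
  induction click generalizing d cm with
  | nil => exact h
  | cons i t ih =>
      simp only [List.foldl_cons]
      apply ih
      intro k
      by_cases hk : k = i.2.2
      · subst hk
        refine ⟨?_, ?_⟩
        · simp [pvAStep, PySem.Dict.modify.eq_1]
        · have hG := (h i.2.2).2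
          simp only [pvAStep, PySem.Dict.getD_modify_self, PySem.Dict.getD_setdefault_self,
            hG, pvG, PySem.Dict.getD_insert_self]
      · have h1 := (h k).1
        have h2 := (h k).2
        refine ⟨?_, ?_⟩
        · simp [pvAStep, PySem.Dict.modify.eq_1, PySem.Dict.contains_insert,
            PySem.Dict.contains_setdefault, h1, Bool.or_left_comm]
        · simp only [pvAStep, PySem.Dict.modify.eq_1]
          rw [PySem.Dict.getD_insert_of_ne _ _ _ hk, PySem.Dict.getD_insert_of_ne _ _ _ hk,
            PySem.Dict.getD_eq_get?_getD, PySem.Dict.get?_setdefault_of_ne _ _ hk,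
            ← PySem.Dict.getD_eq_get?_getD, h2]
          simp only [pvG]
          rw [PySem.Dict.getD_insert_of_ne _ _ _ hk]

theorem nodup_keys_click_fold (click : List (Int × Int × Int))
    (d : PySem.Dict Int (Int × Int × Int × Int × Int)) (h : d.keys.Nodup) :
    (click.foldl pvAStep d).keys.Nodup := by
  induction click generalizing d with
  | nil => exact h
  | cons i t ih =>
      simp only [List.foldl_cons]
      apply ih
      simp only [pvAStep, PySem.Dict.modify.eq_1]
      apply PySem.Dict.nodup_keys_insert
      apply PySem.Dict.nodup_keys_insert
      by_cases hc : d.contains i.2.2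
      · rw [PySem.Dict.setdefault_of_contains _ _ hc]; exact h
      · rw [PySem.Dict.setdefault_of_not_contains _ _ (by simpa using hc)]
        exact PySem.Dict.nodup_keys_insert _ _ _ h

-- ===== VERDICT (by name: the statement is the Claim_ definition above) =====
theorem merge_stat_res_spec : Claim_equal_merge_stat_res := by
  intro view click _
  unfold Spec_merge_stat_res
  simp only [merge_stat_res, merge_stat_res_alt]
  set vm := pvIdx view with hvm
  set cm := pvIdx click with hcm
  set res := click.foldl pvAStep
      (view.foldl (fun d i => d.insert i.2.2 (i.1, i.2.1, 0, 0, i.2.2)) PySem.Dict.empty) with hres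
  have hview := view_fold_inv view PySem.Dict.empty PySem.Dict.empty
      (by intro k; simp [PySem.Dict.contains_empty, PySem.Dict.getD_empty])
  have hinv : ∀ k, res.contains k = (vm.contains k || cm.contains k) ∧
      res.getD k (0, 0, 0, 0, k) = pvG vm cm k := by
    apply click_fold_inv
    intro k
    refine ⟨?_, ?_⟩
    · simp [(hview k).1, hvm, pvIdx, PySem.Dict.contains_empty]
    · simp [(hview k).2, hvm, pvIdx, pvG, PySem.Dict.getD_empty]
  have hndres : res.keys.Nodup := by
    apply nodup_keys_click_fold
    have hv : ∀ (l : List (Int × Int × Int)) (d : PySem.Dict Int (Int × Int × Int × Int × Int)),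
        d.keys.Nodup → (l.foldl (fun d i => d.insert i.2.2 (i.1, i.2.1, 0, 0, i.2.2)) d).keys.Nodup := by
      intro l
      induction l with
      | nil => intro d h; exact h
      | cons i t ih => intro d h; exact ih _ (PySem.Dict.nodup_keys_insert _ _ _ h)
    exact hv view PySem.Dict.empty (by simp [PySem.Dict.keys_empty])
  have hvals : res.values = res.keys.map (pvG vm cm) := by
    rw [PySem.Dict.values_eq_map_keys res hndres (0, 0, 0, 0, 0)]
    apply List.map_congr_left
    intro k hk
    have hc : res.contains k = true := (PySem.Dict.contains_iff_mem_keys res k).2 hk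
    have hsome : ∃ v, res.get? k = some v := by
      have h' := PySem.Dict.contains_eq_isSome_get? res k
      rw [hc] at h'
      exact Option.isSome_iff_exists.mp h'.symm
    obtain ⟨v, hv⟩ := hsome
    rw [PySem.Dict.getD_of_get?_eq_some _ _ hv,
      ← PySem.Dict.getD_of_get?_eq_some res (0, 0, 0, 0, k) hv]
    exact (hinv k).2
  -- B-side: the merge is the key merge mapped through pvG
  set kv := (pvLatest view).map (fun u => u.2.2) with hkv
  set kc := (pvLatest click).map (fun u => u.2.2) with hkc
  have hkvp : kv.Pairwise (· < ·) := by
    rw [hkv, List.pairwise_map]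
    exact pvLatest_pairwise view
  have hkcp : kc.Pairwise (· < ·) := by
    rw [hkc, List.pairwise_map]
    exact pvLatest_pairwise click
  have hB : pvMerge (pvLatest view) (pvLatest click) = (pvKMerge kv kc).map (pvG vm cm) := by
    apply pvMerge_eq vm cm (pvLatest view) (pvLatest click)
        (pvLatest_pairwise view) (pvLatest_pairwise click)
    · exact fun t ht => pvLatest_getD view t ht
    · exact fun t ht => pvLatest_getD click t ht
    · exact fun t _ hco => (pvIdx_contains_iff click t.2.2).1 hco
    · exact fun t _ hco => (pvIdx_contains_iff view t.2.2).1 hco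
  rw [hB]
  apply PySem.List.sorted_eq_of_perm_of_pairwise_lt
  · rw [hvals]
    apply List.Perm.map
    apply (List.perm_ext_iff_of_nodup ?_ hndres).2
    · intro x
      rw [pvKMerge_mem, ← PySem.Dict.contains_iff_mem_keys, (hinv x).1, Bool.or_eq_true,
        hkv, hkc]
      exact or_congr (pvIdx_contains_iff view x).symm (pvIdx_contains_iff click x).symm
    · exact (List.nodup_iff_pairwise_ne).2 ((pvKMerge_pairwise kv kc hkvp hkcp).imp ne_of_lt)
  · rw [List.pairwise_map]
    exact (pvKMerge_pairwise kv kc hkvp hkcp).imp (fun h => by simpa [pvG] using h)
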